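-- pv_equiv track=rewrite | github.com/joeliouscaesar/assignment1-basics | cs336_basics/scratch_bpe.py | split_on_special_tokens
-- ===== SOURCE A (Python) =====
-- def split_on_special_tokens(str_value, special_tokens:list[str]):
--     str_list = []
--     while True:
--         locs = [str_value.find(st) for st in special_tokens]
--         actual_locs = [loc for loc in locs if loc >= 0]
--         actual_loc_sts = [st for (st,loc) in zip(special_tokens, locs) if loc >= 0]
--         if actual_locs == []:
--             str_list.append(str_value)
--             break
--         else:
--             first_match = min(actual_locs)
--             first_match_st = actual_loc_sts[actual_locs.index(first_match)]
--             splits = str_value.split(first_match_st, 1)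
--             str_list.append(splits[0])
--             str_value = splits[1]
--     return str_list
-- ===== SOURCE B (Python) =====
-- def split_on_special_tokens(str_value, special_tokens):
--     # Single left-to-right scan: at each position try the tokens in list order;
--     # cut a segment at the first position where some token matches.
--     out = []
--     n = len(str_value)
--     seg_start = 0
--     i = 0
--     while i < n:
--         for st in special_tokens:
--             if str_value.startswith(st, i):
--                 out.append(str_value[seg_start:i])
--                 i += len(st)
--                 seg_start = i
--                 break
--         else:
--             i += 1
--     out.append(str_value[seg_start:])
--     return out
-- ===== Notes on version B (the rewrite author's own statement) =====
-- stated objective: faster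
-- what changed: A repeatedly runs find() for every token on the whole remaining string and re-splits per segment; B makes a single left-to-right scan that cuts a segment whenever a token matches at the current position, so earlier text is never rescanned.
import Mathlib
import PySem

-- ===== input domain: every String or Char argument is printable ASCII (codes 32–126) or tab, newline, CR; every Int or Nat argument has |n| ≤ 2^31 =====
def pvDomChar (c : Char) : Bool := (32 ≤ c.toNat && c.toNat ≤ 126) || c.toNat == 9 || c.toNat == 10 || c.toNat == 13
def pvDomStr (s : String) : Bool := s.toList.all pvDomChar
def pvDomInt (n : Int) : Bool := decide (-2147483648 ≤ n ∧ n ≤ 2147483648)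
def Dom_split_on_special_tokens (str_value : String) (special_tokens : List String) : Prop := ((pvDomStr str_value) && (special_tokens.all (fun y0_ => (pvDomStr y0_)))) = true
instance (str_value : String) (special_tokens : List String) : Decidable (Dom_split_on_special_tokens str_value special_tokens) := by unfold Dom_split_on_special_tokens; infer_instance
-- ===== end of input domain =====

-- B replaces A's repeated find-the-earliest-token-and-split rounds by one left-to-right scan
-- that cuts a segment whenever a special token matches at the current position (objective: faster).

-- ===== PORT A =====
-- One iteration of A's `while True` loop; fuel (initially length+1) only totalizes the loop:
-- inside Pre_ the remaining string strictly shrinks every round, so fuel never runs out.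
def splitA_loop (special : List (List Char)) : Nat → List Char → List (List Char) → List (List Char)
  | 0, s, acc => acc ++ [s]                     -- fuel exhausted (unreachable under Pre_)
  | fuel+1, s, acc =>
    let locs := special.map (fun st => PySem.Chars.find s st)
    let actual_locs := locs.filter (fun l => decide (0 ≤ l))
    let actual_loc_sts := ((special.zip locs).filter (fun p => decide (0 ≤ p.2))).map Prod.fst
    if actual_locs = [] then acc ++ [s]
    else
      match PySem.List.min? actual_locs id with      -- min(actual_locs); list is nonempty here
      | none => acc ++ [s]                           -- unreachable
      | some first_match =>
        match PySem.List.index? actual_locs first_match with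
        | none => acc ++ [s]                         -- unreachable: first_match ∈ actual_locs
        | some idx =>
          let first_match_st := PySem.List.pyGetD actual_loc_sts (idx : Int) []
          match PySem.Chars.splitMax? s first_match_st 1 with
          | none => acc                              -- Python raises ValueError (empty separator): outside Pre_
          | some splits =>
            splitA_loop special fuel (PySem.List.pyGetD splits 1 []) (acc ++ [PySem.List.pyGetD splits 0 []])

def split_on_special_tokens (str_value : String) (special_tokens : List String) : List String :=
  (splitA_loop (special_tokens.map String.toList) (str_value.toList.length + 1)
      str_value.toList []).map String.ofList

-- ===== PORT B =====
-- B's scan: `seg` is the current segment (the characters since the last cut, i.e.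
-- str_value[seg_start:i]); at each position the tokens are tried in list order.
-- `rest.drop (t.length - 1)` is `s.drop t.length` for the nonempty tokens Pre_ admits
-- (for an empty token Python B loops forever; the port consumes one character instead).
def scanB (special : List (List Char)) : List Char → List Char → List (List Char) → List (List Char)
  | [], seg, acc => acc ++ [seg]
  | c :: rest, seg, acc =>
    match special.find? (fun t => PySem.Chars.startswith (c :: rest) t) with
    | some t => scanB special (rest.drop (t.length - 1)) [] (acc ++ [seg])
    | none => scanB special rest (seg ++ [c]) acc
  termination_by s => s.length
  decreasing_by
    · simp only [List.length_drop, List.length_cons]; omega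
    · simp only [List.length_cons]; omega

def split_on_special_tokens_alt (str_value : String) (special_tokens : List String) : List String :=
  (scanB (special_tokens.map String.toList) str_value.toList [] []).map String.ofList

-- ===== PRECONDITION & SPEC =====
-- Pre_ excludes exactly the inputs with an empty special token, on which A always raises
-- ValueError (str.split separator must not be empty) and B loops forever.
def Pre_split_on_special_tokens (str_value : String) (special_tokens : List String) : Prop :=
  "" ∉ special_tokens
instance (str_value : String) (special_tokens : List String) : Decidable (Pre_split_on_special_tokens str_value special_tokens) := by unfold Pre_split_on_special_tokens; infer_instance

def pvWitness_split_on_special_tokens : String × List String := ("a<|x|>b<|y|>c", ["<|x|>", "<|y|>"])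

def Spec_split_on_special_tokens (str_value : String) (special_tokens : List String) (out : List String) : Prop := out = split_on_special_tokens_alt str_value special_tokens
instance (str_value : String) (special_tokens : List String) (out : List String) : Decidable (Spec_split_on_special_tokens str_value special_tokens out) := by unfold Spec_split_on_special_tokens; infer_instance

-- ===== CLAIM (what is proved, stated in full; the proofs are below) =====
def Claim_equal_split_on_special_tokens : Prop := ∀ (str_value : String) (special_tokens : List String), Dom_split_on_special_tokens str_value special_tokens → Pre_split_on_special_tokens str_value special_tokens → Spec_split_on_special_tokens str_value special_tokens (split_on_special_tokens str_value special_tokens)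

-- ===== LEMMAS AND PROOFS =====

theorem pv_witness_ok :
    Dom_split_on_special_tokens pvWitness_split_on_special_tokens.1 pvWitness_split_on_special_tokens.2 ∧
    Pre_split_on_special_tokens pvWitness_split_on_special_tokens.1 pvWitness_split_on_special_tokens.2 := by
  decide

-- small generic facts ------------------------------------------------------

theorem pv_find?_congr {α : Type} (l : List α) (p q : α → Bool)
    (h : ∀ a ∈ l, p a = q a) : l.find? p = l.find? q := by
  induction l with
  | nil => rfl
  | cons a t ih =>
    have ha := h a (by simp)
    simp only [List.find?_cons, ha]
    cases q a
    · exact ih (fun b hb => h b (by simp [hb]))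
    · rfl

theorem pv_min?_isSome {α κ : Type} [LT κ] [DecidableLT κ] (xs : List α) (key : α → κ)
    (h : xs ≠ []) : ∃ m, PySem.List.min? xs key = some m := by
  have aux : ∀ (l : List α) (a : α),
      ∃ m, List.foldl
        (fun acc x => match acc with
          | none => some x
          | some m => if key x < key m then some x else some m)
        (some a) l = some m := by
    intro l
    induction l with
    | nil => intro a; exact ⟨a, rfl⟩
    | cons x t ih =>
      intro a
      simp only [List.foldl_cons]
      by_cases hx : key x < key a
      · simpa [hx] using ih x
      · simpa [hx] using ih a
  cases xs with
  | nil => exact absurd rfl h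
  | cons a t =>
    simpa [PySem.List.min?] using aux t a

-- A's "index the first minimal loc back into the token list" step:
-- `l` stands for the filtered token list, `f t` for find s t.
theorem pv_choose {f : List Char → Int} (l : List (List Char)) (m : Int)
    (hex : ∃ t ∈ l, f t = m) :
    ∃ i st, List.idxOf? m (l.map f) = some i ∧
      l.find? (fun t => decide (f t = m)) = some st ∧
      PySem.List.pyGetD l (i : Int) [] = st := by
  induction l with
  | nil => simp at hex
  | cons t0 rest ih =>
    by_cases h0 : f t0 = m
    · exact ⟨0, t0, by simp [List.idxOf?_cons, h0], by simp [List.find?_cons, h0], by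
        simp⟩
    · have hex' : ∃ t ∈ rest, f t = m := by
        rcases hex with ⟨t, ht, hft⟩
        rcases List.mem_cons.mp ht with rfl | hmem
        · exact absurd hft h0
        · exact ⟨t, hmem, hft⟩
      rcases ih hex' with ⟨i, st, hidx, hfind, hget⟩
      refine ⟨i + 1, st, ?_, ?_, ?_⟩
      · have : (f t0 == m) = false := by simpa using h0
        simp [List.idxOf?_cons, this, hidx]
      · simp [h0, hfind]
      · rw [PySem.List.pyGetD_natCast] at hget ⊢
        simpa [List.getD_cons_succ] using hget

-- splitOnMax.go with maxsplit 0 just returns everything ---------------------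

theorem pv_go_zero (sep : List Char) (fuel : Nat) (l cur : List Char) (acc : List (List Char)) :
    PySem.Chars.splitOnMax.go sep fuel 0 l cur acc = ((cur.reverse ++ l) :: acc).reverse := by
  cases fuel with
  | zero => simp [PySem.Chars.splitOnMax.go]
  | succ n => cases l <;> simp [PySem.Chars.splitOnMax.go]

-- splitOnMax with maxsplit 1 splits at the first occurrence ------------------

theorem pv_go_one (sep : List Char) (mN : Nat) :
    ∀ (l : List Char) (fuel : Nat) (cur : List Char) (acc : List (List Char)),
      l.length < fuel → sep ≠ [] →
      sep <+: l.drop mN → (∀ i < mN, ¬ sep <+: l.drop i) →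
      PySem.Chars.splitOnMax.go sep fuel 1 l cur acc =
        acc.reverse ++ [cur.reverse ++ l.take mN, l.drop (mN + sep.length)] := by
  induction mN with
  | zero =>
    intro l fuel cur acc hfuel hsep hpre _
    cases l with
    | nil =>
      exact absurd (List.prefix_nil.mp (by simpa using hpre)) hsep
    | cons c rest =>
      cases fuel with
      | zero => omega
      | succ f =>
        have hpf : sep.isPrefixOf (c :: rest) = true := by
          rw [List.isPrefixOf_iff_prefix]; simpa using hpre
        simp only [PySem.Chars.splitOnMax.go, hpf, if_neg (by omega : (1:Nat) ≠ 0)]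
        rw [pv_go_zero]
        simp
  | succ n ih =>
    intro l fuel cur acc hfuel hsep hpre hmin
    cases l with
    | nil =>
      exact absurd (List.prefix_nil.mp (by simpa using hpre)) hsep
    | cons c rest =>
      cases fuel with
      | zero => omega
      | succ f =>
        have hpf : sep.isPrefixOf (c :: rest) = false := by
          rw [Bool.eq_false_iff]
          intro hc
          exact hmin 0 (by omega) (by simpa using List.isPrefixOf_iff_prefix.mp hc)
        simp only [PySem.Chars.splitOnMax.go, hpf, if_neg (by omega : (1:Nat) ≠ 0)]
        rw [ih rest f (c :: cur) acc (by simpa using Nat.lt_of_succ_lt_succ hfuel) hsep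
          (by simpa using hpre) (fun i hi => by simpa using hmin (i+1) (by omega))]
        rw [show n+1+sep.length = (n+sep.length)+1 by omega, List.drop_succ_cons]
        simp

theorem pv_split_one (s sep : List Char) (mN : Nat) (hsep : sep ≠ [])
    (hpre : sep <+: s.drop mN) (hmin : ∀ i < mN, ¬ sep <+: s.drop i) :
    PySem.Chars.splitMax? s sep 1 = some [s.take mN, s.drop (mN + sep.length)] := by
  have : sep.isEmpty = false := by simpa [List.isEmpty_iff] using hsep
  simp only [PySem.Chars.splitMax?, this, Bool.false_eq_true, if_false,
    PySem.Chars.splitOnMax, if_neg (by omega : ¬ (1:Int) < 0), Int.toNat_one]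
  rw [pv_go_one sep mN s (s.length + 1) [] [] (by omega) hsep hpre hmin]
  simp

-- B-side scan lemmas --------------------------------------------------------

theorem pv_zip_filter {α : Type} (l : List α) (f : α → Int) :
    ((l.zip (l.map f)).filter (fun p => decide (0 ≤ p.2))).map Prod.fst =
      l.filter (fun t => decide (0 ≤ f t)) := by
  induction l with
  | nil => rfl
  | cons a t ih =>
    by_cases h : 0 ≤ f a <;> simp [h, ih]

theorem pv_scanB_nomatch (special : List (List Char)) (s : List Char) :
    ∀ (seg : List Char) (acc : List (List Char)),
      (∀ t ∈ special, ¬ t <:+: s) →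
      scanB special s seg acc = acc ++ [seg ++ s] := by
  induction s with
  | nil => intro seg acc _; simp [scanB]
  | cons c rest ih =>
    intro seg acc h
    have hf : special.find? (fun t => PySem.Chars.startswith (c :: rest) t) = none := by
      rw [List.find?_eq_none]
      intro t ht hc
      exact h t ht ((List.isPrefixOf_iff_prefix.mp
        (by simpa [PySem.Chars.startswith] using hc)).isInfix)
    rw [scanB, hf]
    rw [ih (seg ++ [c]) acc (fun t ht hi =>
      h t ht (hi.trans (List.suffix_cons c rest).isInfix))]
    simp

theorem pv_scanB_skip (special : List (List Char)) (mN : Nat) :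
    ∀ (s seg : List Char) (acc : List (List Char)),
      (∀ i < mN, ∀ t ∈ special, ¬ t <+: s.drop i) →
      scanB special s seg acc = scanB special (s.drop mN) (seg ++ s.take mN) acc := by
  induction mN with
  | zero => intro s seg acc _; simp
  | succ n ih =>
    intro s seg acc h
    cases s with
    | nil => simp
    | cons c rest =>
      have hf : special.find? (fun t => PySem.Chars.startswith (c :: rest) t) = none := by
        rw [List.find?_eq_none]
        intro t ht hc
        exact h 0 (by omega) t ht (by
          simpa using List.isPrefixOf_iff_prefix.mp
            (by simpa [PySem.Chars.startswith] using hc))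
      rw [scanB, hf]
      rw [ih rest (seg ++ [c]) acc (fun i hi t ht => by
        simpa using h (i + 1) (by omega) t ht)]
      simp

theorem pv_scanB_match (special : List (List Char)) (s : List Char) (t : List Char)
    (seg : List Char) (acc : List (List Char))
    (hfind : special.find? (fun u => PySem.Chars.startswith s u) = some t)
    (ht : t ≠ []) :
    scanB special s seg acc = scanB special (s.drop t.length) [] (acc ++ [seg]) := by
  have hpre : t <+: s := List.isPrefixOf_iff_prefix.mp
    (by simpa [PySem.Chars.startswith] using List.find?_some hfind)
  cases s with
  | nil => exact absurd (List.prefix_nil.mp hpre) ht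
  | cons c rest =>
    rw [scanB, hfind]
    obtain ⟨k, hk⟩ : ∃ k, t.length = k + 1 :=
      ⟨t.length - 1, by have := List.length_pos_iff.mpr ht; omega⟩
    simp [hk]

-- the main loop equivalence, at the character-list level ---------------------

theorem pv_main (special : List (List Char)) (hne : [] ∉ special) :
    ∀ (fuel : Nat) (s : List Char) (acc : List (List Char)), s.length < fuel →
      splitA_loop special fuel s acc = scanB special s [] acc := by
  intro fuel
  induction fuel with
  | zero => intro s acc h; omega
  | succ f ih =>
    intro s acc hfuel
    have hlocs : (List.map (fun st => PySem.Chars.find s st) special).filter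
          (fun l => decide (0 ≤ l)) =
        (special.filter (fun t => decide (0 ≤ PySem.Chars.find s t))).map
          (fun st => PySem.Chars.find s st) := by
      rw [List.filter_map]; rfl
    have hsts : (((special.zip (List.map (fun st => PySem.Chars.find s st) special)).filter
          (fun p => decide (0 ≤ p.2))).map Prod.fst) =
        special.filter (fun t => decide (0 ≤ PySem.Chars.find s t)) := by
      exact pv_zip_filter special (fun st => PySem.Chars.find s st)
    by_cases hempty : (List.map (fun st => PySem.Chars.find s st) special).filter
        (fun l => decide (0 ≤ l)) = []
    · -- no token occurs in s: A appends the whole string, B scans through it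
      have hno : ∀ t ∈ special, ¬ t <:+: s := by
        intro t ht hinf
        have hts : special.filter (fun t => decide (0 ≤ PySem.Chars.find s t)) = [] := by
          have h2 := hempty; rw [hlocs] at h2
          exact List.map_eq_nil_iff.mp h2
        have hneg := List.filter_eq_nil_iff.mp hts t ht
        rw [decide_eq_true_eq] at hneg
        exact hneg ((PySem.Chars.find_nonneg_iff s t).mpr hinf)
      rw [pv_scanB_nomatch special s [] acc hno]
      simp [splitA_loop, hempty]
    · -- some token occurs
      have hts'ne : special.filter (fun t => decide (0 ≤ PySem.Chars.find s t)) ≠ [] := by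
        intro h0
        exact hempty (by rw [hlocs, h0]; rfl)
      obtain ⟨m, hmin⟩ := pv_min?_isSome
        ((special.filter (fun t => decide (0 ≤ PySem.Chars.find s t))).map
          (fun st => PySem.Chars.find s st)) id (by simpa using hts'ne)
      have hmle : ∀ t ∈ special, 0 ≤ PySem.Chars.find s t → m ≤ PySem.Chars.find s t := by
        intro t ht h0t
        exact PySem.List.min?_isMin hmin _
          (List.mem_map_of_mem (List.mem_filter.mpr ⟨ht, by simpa using h0t⟩))
      have hmmem := PySem.List.min?_mem hmin
      obtain ⟨t0, ht0, hft0⟩ := List.mem_map.mp hmmem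
      have hm0 : 0 ≤ m := by
        have := (List.mem_filter.mp ht0).2
        rw [decide_eq_true_eq] at this
        omega
      obtain ⟨i, st, hidx, hfindst, hget⟩ := pv_choose
        (f := fun st => PySem.Chars.find s st)
        (special.filter (fun t => decide (0 ≤ PySem.Chars.find s t))) m ⟨t0, ht0, hft0⟩
      have hstmem' := List.mem_of_find?_eq_some hfindst
      have hstmem : st ∈ special := (List.mem_filter.mp hstmem').1
      have hstf : PySem.Chars.find s st = m := by
        have := List.find?_some hfindst
        rwa [decide_eq_true_eq] at this
      have hstne : st ≠ [] := fun h0 => hne (h0 ▸ hstmem)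
      have hstlen : 1 ≤ st.length := List.length_pos_iff.mpr hstne
      have hfs : (0:Int) ≤ PySem.Chars.find s st := by omega
      obtain ⟨hpre0, hminpos0⟩ := PySem.Chars.find_spec hfs
      have htoNat : (PySem.Chars.find s st).toNat = m.toNat := by rw [hstf]
      rw [htoNat] at hpre0 hminpos0
      -- the first position where ANY token matches is m.toNat
      have hminAll : ∀ i < m.toNat, ∀ t ∈ special, ¬ t <+: List.drop i s := by
        intro j hj t ht hp
        have hinf : t <:+: s := hp.isInfix.trans (List.drop_suffix j s).isInfix
        have h0t : (0:Int) ≤ PySem.Chars.find s t :=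
          (PySem.Chars.find_nonneg_iff s t).mpr hinf
        obtain ⟨_, hmint⟩ := PySem.Chars.find_spec h0t
        have hle : (PySem.Chars.find s t).toNat ≤ j := by
          by_contra hlt
          exact hmint j (by omega) hp
        have := hmle t ht h0t
        omega
      -- A picks the first token in list order that matches at position m.toNat
      have hfindB : special.find? (fun u => PySem.Chars.startswith (List.drop m.toNat s) u)
          = some st := by
        rw [← hfindst, List.find?_filter]
        apply pv_find?_congr
        intro t ht
        by_cases hp : t <+: List.drop m.toNat s
        · have hsw : PySem.Chars.startswith (List.drop m.toNat s) t = true :=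
            (PySem.Chars.startswith_iff _ _).mpr hp
          have hinf : t <:+: s := hp.isInfix.trans (List.drop_suffix m.toNat s).isInfix
          have h0t : (0:Int) ≤ PySem.Chars.find s t :=
            (PySem.Chars.find_nonneg_iff s t).mpr hinf
          obtain ⟨_, hmint⟩ := PySem.Chars.find_spec h0t
          have hle : (PySem.Chars.find s t).toNat ≤ m.toNat := by
            by_contra hlt
            exact hmint m.toNat (by omega) hp
          have hge := hmle t ht h0t
          have heq : PySem.Chars.find s t = m := by omega
          rw [hsw]
          simp [heq, hm0]
        · have hsw : PySem.Chars.startswith (List.drop m.toNat s) t = false := by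
            rw [Bool.eq_false_iff]
            intro hc
            exact hp ((PySem.Chars.startswith_iff _ _).mp hc)
          rw [hsw]
          symm
          rw [decide_eq_false_iff_not]
          rintro ⟨h0t, heq⟩
          rw [decide_eq_true_eq] at h0t heq
          obtain ⟨hq, _⟩ := PySem.Chars.find_spec h0t
          rw [heq] at hq
          exact hp hq
      -- A's split(st, 1)
      have hsplit : PySem.Chars.splitMax? s st 1 =
          some [s.take m.toNat, s.drop (m.toNat + st.length)] :=
        pv_split_one s st m.toNat hstne hpre0 (fun j hj => hminpos0 j hj)
      -- reduce B's side
      rw [pv_scanB_skip special m.toNat s [] acc hminAll, List.nil_append,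
          pv_scanB_match special (List.drop m.toNat s) st (List.take m.toNat s) acc hfindB hstne]
      -- reduce A's side
      simp only [splitA_loop, hlocs, hsts]
      rw [if_neg (by simpa using hts'ne), hmin]
      simp only [PySem.List.index?, hidx, hget, hsplit]
      have hg0 : PySem.List.pyGetD [s.take m.toNat, s.drop (m.toNat + st.length)] (0:Int)
          ([] : List Char) = s.take m.toNat := by simp [pysem]
      have hg1 : PySem.List.pyGetD [s.take m.toNat, s.drop (m.toNat + st.length)] (1:Int)
          ([] : List Char) = s.drop (m.toNat + st.length) := by simp [pysem]
      rw [hg0, hg1]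
      rw [ih (s.drop (m.toNat + st.length)) (acc ++ [s.take m.toNat]) (by
        have h2 := hpre0.length_le
        simp only [List.length_drop] at h2 ⊢
        omega)]
      rw [List.drop_drop]

theorem pv_toplevel (str_value : String) (special_tokens : List String)
    (hpre : "" ∉ special_tokens) :
    split_on_special_tokens str_value special_tokens =
      split_on_special_tokens_alt str_value special_tokens := by
  unfold split_on_special_tokens split_on_special_tokens_alt
  have hne : [] ∉ special_tokens.map String.toList := by
    intro hmem
    obtain ⟨t, ht, htl⟩ := List.mem_map.mp hmem
    exact hpre (String.toList_eq_nil_iff.mp htl ▸ ht)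
  rw [pv_main (special_tokens.map String.toList) hne (str_value.toList.length + 1)
    str_value.toList [] (by omega)]

-- ===== VERDICT (by name: the statement is the Claim_ definition above) =====
theorem split_on_special_tokens_spec : Claim_equal_split_on_special_tokens := by
  intro str_value special_tokens _ hpre
  unfold Spec_split_on_special_tokens
  rw [pv_toplevel str_value special_tokens hpre]
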